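-- pv_equiv track=rewrite | github.com/eternityxxxx/E1.12 | app/hangman.py | view_word_state
-- ===== SOURCE A (Python) =====
-- def view_word_state(word, hitted):
--     word_state = ''
--     for letter in word:
--         if letter in hitted:
--             word_state += letter
--         else:
--             word_state += '_'
--     if '_' in word_state:
--         return word_state
--     else:
--         return ''
-- ===== SOURCE B (Python) =====
-- def view_word_state(word, hitted):
--     # Set-difference first: the letters of word not yet hit; empty set == fully revealed.
--     missing = set(word) - set(hitted)
--     if not missing:
--         return ''
--     # Replace every missing letter by '_' via a translation table, in one translate call.
--     return word.translate({ord(c): '_' for c in missing})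
-- ===== Notes on version B (the rewrite author's own statement) =====
-- stated objective: faster
-- what changed: B computes the set of still-missing letters once as a set difference set(word)-set(hitted), decides completion by that set's emptiness, and produces the masked string with a single C-level str.translate over a table mapping each missing letter to '_', instead of A's per-letter Python loop with += concatenation followed by searching the built string for a '_' sentinel.
-- intended difference: When word contains a literal '_' and every letter of word is in hitted, A's '_' sentinel fires on the fully revealed string and A returns the whole word, while B returns '' as intended for a fully revealed word. — e.g. on view_word_state("a_", "a_"): A returns "a_", B returns ""
import Mathlib
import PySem

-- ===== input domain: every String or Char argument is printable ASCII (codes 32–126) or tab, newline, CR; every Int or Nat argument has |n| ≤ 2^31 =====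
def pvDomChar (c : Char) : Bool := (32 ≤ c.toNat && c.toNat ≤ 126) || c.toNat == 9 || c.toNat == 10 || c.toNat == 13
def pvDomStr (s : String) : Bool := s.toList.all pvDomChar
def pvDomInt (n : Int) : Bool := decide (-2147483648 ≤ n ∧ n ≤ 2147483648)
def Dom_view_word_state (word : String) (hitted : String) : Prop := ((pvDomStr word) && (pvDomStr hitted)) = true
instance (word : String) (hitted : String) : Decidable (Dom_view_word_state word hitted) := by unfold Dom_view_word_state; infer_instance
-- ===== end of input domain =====

-- B replaces A's build-then-scan-for-'_'-sentinel loop by a set difference (the missing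
-- letters), emptiness test, and one translation-table substitution; on words that contain a
-- literal '_' and are fully revealed, B returns '' where A's sentinel misfires.

-- ===== PORT A =====
-- Python strings are ported as their character lists; `letter in hitted` for a
-- single character is exactly character membership in hitted.toList.
def view_word_state (word : String) (hitted : String) : String :=
  let word_state : List Char :=
    word.toList.foldl
      (fun acc letter => if letter ∈ hitted.toList then acc ++ [letter] else acc ++ ['_']) []
  if '_' ∈ word_state then String.ofList word_state else ""

-- ===== PORT B =====
-- set(word) - set(hitted) is PySem.Set.diff; the {ord(c): '_' for c in missing} table is a
-- Dict keyed by the character itself (ord is a bijection, translate looks up ord(char)), and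
-- str.translate is ported by hand, exactly: each character is replaced by its table entry if
-- present, else kept. The table's values are all '_', so the set's iteration order is immaterial.
def view_word_state_alt (word : String) (hitted : String) : String :=
  let missing : PySem.Set Char := PySem.Set.diff (PySem.Set.ofList word.toList) hitted.toList
  if missing = [] then ""
  else
    let table : PySem.Dict Char Char :=
      missing.foldl (fun d c => d.insert c '_') PySem.Dict.empty
    String.ofList (word.toList.map (fun c => (table.get? c).getD c))

-- ===== PRECONDITION & SPEC =====
-- When word contains a literal '_' and every letter of word is in hitted, A's '_' sentinel
-- fires on the fully revealed string and A returns the whole word, while B returns '' as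
-- intended for a fully revealed word.
def D_view_word_state (word : String) (hitted : String) : Prop :=
  '_' ∈ word.toList ∧ ∀ c ∈ word.toList, c ∈ hitted.toList
instance (word : String) (hitted : String) : Decidable (D_view_word_state word hitted) := by
  unfold D_view_word_state; infer_instance

def Spec_view_word_state (word : String) (hitted : String) (out : String) : Prop :=
  ¬ D_view_word_state word hitted → out = view_word_state_alt word hitted
instance (word : String) (hitted : String) (out : String) : Decidable (Spec_view_word_state word hitted out) := by
  unfold Spec_view_word_state; infer_instance

def pvDiffWitness_view_word_state : String × String := ("a_", "a_")
def pvDiffWitnessOut_view_word_state : String × String := ("a_", "")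

-- ===== CLAIM =====
def Claim_unchanged_view_word_state : Prop := ∀ (word : String) (hitted : String), Dom_view_word_state word hitted → Spec_view_word_state word hitted (view_word_state word hitted)
def Claim_changed_view_word_state : Prop := Dom_view_word_state (pvDiffWitness_view_word_state.1) (pvDiffWitness_view_word_state.2) ∧ D_view_word_state (pvDiffWitness_view_word_state.1) (pvDiffWitness_view_word_state.2) ∧ view_word_state (pvDiffWitness_view_word_state.1) (pvDiffWitness_view_word_state.2) = pvDiffWitnessOut_view_word_state.1 ∧ view_word_state_alt (pvDiffWitness_view_word_state.1) (pvDiffWitness_view_word_state.2) = pvDiffWitnessOut_view_word_state.2 ∧ pvDiffWitnessOut_view_word_state.1 ≠ pvDiffWitnessOut_view_word_state.2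
def Claim_exact_view_word_state : Prop := ∀ (word : String) (hitted : String), Dom_view_word_state word hitted → D_view_word_state word hitted → view_word_state word hitted ≠ view_word_state_alt word hitted

-- ===== LEMMAS AND PROOFS =====

-- A's += loop is the accumulator-prefixed map of the masking function.
lemma foldl_mask (hs : List Char) (w acc : List Char) :
    w.foldl (fun acc c => if c ∈ hs then acc ++ [c] else acc ++ ['_']) acc
      = acc ++ w.map (fun c => if c ∈ hs then c else '_') := by
  induction w generalizing acc with
  | nil => simp
  | cons c w ih => simp [List.foldl_cons, ih]; split <;> simp

lemma view_word_state_eq (word hitted : String) :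
    view_word_state word hitted =
      (if '_' ∈ word.toList.map (fun c => if c ∈ hitted.toList then c else '_')
       then String.ofList (word.toList.map (fun c => if c ∈ hitted.toList then c else '_'))
       else "") := by
  unfold view_word_state
  simp [foldl_mask]

-- The translation-table loop: lookup of c answers '_' exactly when c was inserted.
lemma get?_foldl_insert_underscore (l : List Char) (d : PySem.Dict Char Char) (c : Char) :
    ((l.foldl (fun d x => d.insert x '_') d).get? c).getD c
      = if c ∈ l then '_' else (d.get? c).getD c := by
  induction l generalizing d with
  | nil => simp
  | cons x l ih =>
      simp only [List.foldl_cons, ih, List.mem_cons]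
      by_cases hx : c = x
      · subst hx; simp [PySem.Dict.get?_insert_self]
      · simp [PySem.Dict.get?_insert_of_ne _ _ hx, hx]

lemma mem_missing_iff (word hitted : String) (c : Char) :
    c ∈ PySem.Set.diff (PySem.Set.ofList word.toList) hitted.toList
      ↔ c ∈ word.toList ∧ c ∉ hitted.toList := by
  rw [PySem.Set.mem_diff, PySem.Set.mem_ofList]

-- B's result, rewritten as the predicate-plus-map form used by the verdict proof.
lemma view_word_state_alt_eq (word hitted : String) :
    view_word_state_alt word hitted =
      (if ∀ c ∈ word.toList, c ∈ hitted.toList then ""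
       else String.ofList (word.toList.map (fun c => if c ∈ hitted.toList then c else '_'))) := by
  unfold view_word_state_alt
  have hempty : (PySem.Set.diff (PySem.Set.ofList word.toList) hitted.toList = [])
      ↔ ∀ c ∈ word.toList, c ∈ hitted.toList := by
    rw [List.eq_nil_iff_forall_not_mem]
    constructor
    · intro h c hc
      by_contra hn
      exact h c ((mem_missing_iff word hitted c).mpr ⟨hc, hn⟩)
    · intro h c hc
      rcases (mem_missing_iff word hitted c).mp hc with ⟨h1, h2⟩
      exact h2 (h c h1)
  by_cases hall : ∀ c ∈ word.toList, c ∈ hitted.toList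
  · rw [if_pos (hempty.mpr hall), if_pos hall]
  · rw [if_neg (fun h => hall (hempty.mp h)), if_neg hall]
    refine congrArg String.ofList (List.map_congr_left (fun c hc => ?_))
    rw [get?_foldl_insert_underscore]
    simp only [PySem.Dict.get?_empty, Option.getD_none]
    by_cases hch : c ∈ hitted.toList
    · simp [mem_missing_iff, hch]
    · simp [mem_missing_iff, hch, hc]

-- ===== VERDICT =====
theorem view_word_state_spec : Claim_unchanged_view_word_state := by
  intro word hitted _ hD
  unfold D_view_word_state at hD
  rw [view_word_state_eq, view_word_state_alt_eq]
  by_cases hall : ∀ c ∈ word.toList, c ∈ hitted.toList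
  · have hund : '_' ∉ word.toList := fun h => hD ⟨h, hall⟩
    have h1 : '_' ∉ word.toList.map (fun c => if c ∈ hitted.toList then c else '_') := by
      intro h
      rcases List.mem_map.mp h with ⟨c, hc, hfc⟩
      rw [if_pos (hall c hc)] at hfc
      exact hund (hfc ▸ hc)
    rw [if_neg h1, if_pos hall]
  · rw [not_forall] at hall
    obtain ⟨c, hc⟩ := hall
    rw [not_forall] at hc
    obtain ⟨hcm, hcn⟩ := hc
    have h1 : '_' ∈ word.toList.map (fun c => if c ∈ hitted.toList then c else '_') :=
      List.mem_map.mpr ⟨c, hcm, by simp [hcn]⟩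
    rw [if_pos h1, if_neg (by push Not; exact ⟨c, hcm, hcn⟩)]

theorem view_word_state_changed : Claim_changed_view_word_state := by
  unfold Claim_changed_view_word_state
  refine ⟨by decide, ?_, by decide, by decide, by decide⟩
  unfold D_view_word_state pvDiffWitness_view_word_state
  simp

theorem view_word_state_tight : Claim_exact_view_word_state := by
  intro word hitted _ hD
  rcases hD with ⟨hund, hall⟩
  rw [view_word_state_eq, view_word_state_alt_eq]
  have hmap : word.toList.map (fun c => if c ∈ hitted.toList then c else '_') = word.toList := by
    refine List.map_congr_left (fun c hc => if_pos (hall c hc)) |>.trans ?_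
    exact List.map_id word.toList
  have h1 : '_' ∈ word.toList.map (fun c => if c ∈ hitted.toList then c else '_') := by
    rw [hmap]; exact hund
  rw [if_pos h1, if_pos hall, hmap]
  intro h
  have hnil : word.toList = [] := by
    have := congrArg String.toList h
    simpa using this
  rw [hnil] at hund; exact absurd hund (List.not_mem_nil)
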